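-- pv_equiv track=rewrite | github.com/mitchellgoffpc/ask | ask/edit.py | find_most_unique_match
-- ===== SOURCE A (Python) =====
-- import difflib
-- from collections import defaultdict
--
-- def find_most_unique_match(original_lines: list[str], section_lines: list[str]) -> difflib.Match:
--     def find_all_matches(alo, ahi):
--         if alo >= ahi:
--             return []
--         i, j, k = x = matcher.find_longest_match(alo, ahi, 0, len(section_lines))
--         return [*find_all_matches(alo, i), x, *find_all_matches(i + k, ahi)] if k else []
--
--     # First we find all possible matches
--     matcher = difflib.SequenceMatcher(None, original_lines, section_lines)
--     matching_blocks = find_all_matches(0, len(original_lines))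
--
--     # Then we group the matching blocks by (block.b, block.size) and find the group with the fewest matches
--     candidates = defaultdict(list)
--     for block in sorted(matching_blocks):
--         candidates[(block.b, block.size)].append(block.a)
--     j, k = min(candidates, key=lambda k: (len(candidates[k]), -k[1], k[0]))  # sort by (n_matches, -size, start_pos)
--     return difflib.Match._make((candidates[j, k][0], j, k))  # return the first block from the winning group
-- ===== SOURCE B (Python) =====
-- def find_most_unique_match(original_lines: list[str], section_lines: list[str]):
--     # Self-contained re-implementation: difflib's longest-match search is inlined
--     # (isjunk=None, so the junk sets are empty; autojunk drops "popular" lines from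
--     # the index when len(b) >= 200, but the equality-extension loops still run),
--     # the recursive block enumeration is replaced by an iterative worklist, and the
--     # sort/defaultdict grouping by a one-pass counter + a single lexicographic min.
--     a, b = original_lines, section_lines
--     b2j = {}
--     for j, line in enumerate(b):
--         b2j.setdefault(line, []).append(j)
--     n = len(b)
--     if n >= 200:
--         ntest = n // 100 + 1
--         for line in [line for line, idxs in b2j.items() if len(idxs) > ntest]:
--             del b2j[line]
--
--     def find_longest_match(alo, ahi, blo, bhi):
--         besti, bestj, bestsize = alo, blo, 0
--         j2len = {}
--         for i in range(alo, ahi):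
--             newj2len = {}
--             for j in b2j.get(a[i], []):
--                 if j < blo:
--                     continue
--                 if j >= bhi:
--                     break
--                 k = newj2len[j] = j2len.get(j - 1, 0) + 1
--                 if k > bestsize:
--                     besti, bestj, bestsize = i - k + 1, j - k + 1, k
--             j2len = newj2len
--         while besti > alo and bestj > blo and a[besti - 1] == b[bestj - 1]:
--             besti, bestj, bestsize = besti - 1, bestj - 1, bestsize + 1
--         while besti + bestsize < ahi and bestj + bestsize < bhi \
--                 and a[besti + bestsize] == b[bestj + bestsize]:
--             bestsize += 1
--         return besti, bestj, bestsize
--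
--     blocks = []
--     stack = [(0, len(a))]
--     while stack:
--         alo, ahi = stack.pop()
--         if alo < ahi:
--             i, j, k = find_longest_match(alo, ahi, 0, len(b))
--             if k:
--                 blocks.append((i, j, k))
--                 stack.append((i + k, ahi))
--                 stack.append((alo, i))
--     counts = {}
--     for _, j, k in blocks:
--         counts[j, k] = counts.get((j, k), 0) + 1
--     best = min((counts[j, k], -k, j, i) for i, j, k in blocks)
--     return (best[3], best[2], -best[1])
-- ===== Notes on version B (the rewrite author's own statement) =====
-- stated objective: alternative
-- what changed: B inlines difflib's longest-match search directly (no difflib import), replaces A's recursive find_all_matches with an iterative explicit-stack worklist, and replaces A's sort + defaultdict(list) grouping + min-over-keys + first-element lookup with a one-pass (b,size)-counter and a single lexicographic min over (count,-size,b,a) 4-tuples (no sorting, no per-group lists).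
import Mathlib
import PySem

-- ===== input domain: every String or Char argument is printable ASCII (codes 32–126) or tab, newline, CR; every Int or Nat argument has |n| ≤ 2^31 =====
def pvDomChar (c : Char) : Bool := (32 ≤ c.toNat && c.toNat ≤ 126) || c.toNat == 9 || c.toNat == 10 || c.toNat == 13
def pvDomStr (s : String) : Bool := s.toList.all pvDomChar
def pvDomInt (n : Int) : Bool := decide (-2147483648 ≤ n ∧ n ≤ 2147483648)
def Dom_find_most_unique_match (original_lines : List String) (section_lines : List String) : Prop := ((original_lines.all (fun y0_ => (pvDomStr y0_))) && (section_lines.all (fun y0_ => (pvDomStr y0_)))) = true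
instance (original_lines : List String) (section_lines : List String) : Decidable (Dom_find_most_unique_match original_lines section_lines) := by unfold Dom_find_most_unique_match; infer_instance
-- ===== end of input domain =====

-- B replaces A's recursive block search by an iterative worklist and A's sort/defaultdict
-- grouping by a one-pass counter with a single lexicographic min (objective: alternative).

-- ===== PORT A =====
-- Shared difflib model (both Pythons call difflib.SequenceMatcher(None, a, b) identically).
-- Python tuple comparison (lexicographic) on 3- and 4-tuples of ints, written out by hand:
def pvLt3 (u v : Int × Int × Int) : Bool :=
  u.1 < v.1 || (u.1 == v.1 && (u.2.1 < v.2.1 || (u.2.1 == v.2.1 && u.2.2 < v.2.2)))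

def pvLt4 (u v : Int × Int × Int × Int) : Bool :=
  u.1 < v.1 || (u.1 == v.1 && pvLt3 u.2 v.2)

-- difflib.SequenceMatcher.__chain_b: b2j maps a line to the list of its indices in b;
-- with isjunk=None, bjunk is empty; autojunk removes "popular" entries when len(b) >= 200.
def pvChainB (b : List String) : PySem.Dict String (List Int) :=
  let d := (PySem.List.enumerate b 0).foldl
    (fun d p => d.modify p.2 [] (fun l => l ++ [p.1])) PySem.Dict.empty
  if 200 ≤ b.length then
    let ntest := b.length / 100 + 1
    let popular := d.items.foldl (fun acc p => if ntest < p.2.length then acc ++ [p.1] else acc) []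
    popular.foldl (fun d k => d.erase k) d
  else d

-- the inner 'for j in b2j.get(a[i], nothing)' loop of find_longest_match ('continue'/'break' kept)
def pvFlmInner (blo bhi i : Int) :
    List Int → PySem.Dict Int Int → PySem.Dict Int Int → Int × Int × Int →
    PySem.Dict Int Int × (Int × Int × Int)
  | [], _, new, best => (new, best)
  | j :: js, old, new, best =>
    if j < blo then pvFlmInner blo bhi i js old new best
    else if bhi ≤ j then (new, best)
    else
      let k := old.getD (j - 1) 0 + 1
      pvFlmInner blo bhi i js old (new.insert j k)
        (if best.2.2 < k then (i - k + 1, j - k + 1, k) else best)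

-- the two 'while' extension loops (bjunk is empty for isjunk=None, so the junk tests are the
-- constants True/False: the two junk-extension loops never run and are omitted).
-- Fuel: each step decreases besti (≥ alo) resp. increases bestsize (bounded by ahi), so the
-- toNat fuel passed at the call sites is exact.
def pvExtendLo (a b : List String) (alo blo : Int) : Nat → Int × Int × Int → Int × Int × Int
  | 0, best => best
  | n + 1, best =>
    if alo < best.1 ∧ blo < best.2.1 ∧
        PySem.List.pyGetD a (best.1 - 1) "" = PySem.List.pyGetD b (best.2.1 - 1) "" then
      pvExtendLo a b alo blo n (best.1 - 1, best.2.1 - 1, best.2.2 + 1)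
    else best

def pvExtendHi (a b : List String) (ahi bhi : Int) : Nat → Int × Int × Int → Int × Int × Int
  | 0, best => best
  | n + 1, best =>
    if best.1 + best.2.2 < ahi ∧ best.2.1 + best.2.2 < bhi ∧
        PySem.List.pyGetD a (best.1 + best.2.2) "" = PySem.List.pyGetD b (best.2.1 + best.2.2) "" then
      pvExtendHi a b ahi bhi n (best.1, best.2.1, best.2.2 + 1)
    else best

-- difflib.SequenceMatcher.find_longest_match(alo, ahi, blo, bhi)
def pvFlm (a b : List String) (b2j : PySem.Dict String (List Int)) (alo ahi blo bhi : Int) :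
    Int × Int × Int :=
  let r := (PySem.List.pyRange alo ahi 1).foldl
    (fun (st : PySem.Dict Int Int × (Int × Int × Int)) i =>
      pvFlmInner blo bhi i (b2j.getD (PySem.List.pyGetD a i "") []) st.1 PySem.Dict.empty st.2)
    (PySem.Dict.empty, (alo, blo, 0))
  let best := pvExtendLo a b alo blo (r.2.1 - alo).toNat r.2
  pvExtendHi a b ahi bhi (ahi - (best.1 + best.2.2)).toNat best

-- A's recursive find_all_matches.  Fuel: each recursive call strictly shrinks the
-- integer interval [alo, ahi), so fuel = (ahi - alo).toNat at the top call is exact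
-- (when the fuel is exhausted the interval is already empty and the result is []).
def pvAllMatches (a b : List String) (b2j : PySem.Dict String (List Int)) :
    Nat → Int → Int → List (Int × Int × Int)
  | 0, _, _ => []
  | n + 1, alo, ahi =>
    if ahi ≤ alo then []
    else
      let x := pvFlm a b b2j alo ahi 0 (b.length : Int)
      if x.2.2 = 0 then []
      else pvAllMatches a b b2j n alo x.1 ++ x :: pvAllMatches a b b2j n (x.1 + x.2.2) ahi

-- sorted(matching_blocks): Python compares the triples lexicographically; ported by hand as
-- PySem.List.sorted's insertBy fold (PySem.sorted has no 3-component tuple key) — exact.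
def pvSortBlocks (l : List (Int × Int × Int)) : List (Int × Int × Int) :=
  l.foldl (fun acc x => PySem.List.insertBy (fun u v => pvLt3 u v) x acc) []

-- the defaultdict(list) grouping loop
def pvGroupA (s : List (Int × Int × Int)) : PySem.Dict (Int × Int) (List Int) :=
  s.foldl (fun d x => d.modify (x.2.1, x.2.2) [] (fun l => l ++ [x.1])) PySem.Dict.empty

-- min(candidates, key=...) then candidates[j, k][0]
def pvSelectA (cand : PySem.Dict (Int × Int) (List Int)) : Int × Int × Int :=
  match cand.keys with
  | [] => (0, 0, 0)  -- Python: min() of an empty dict raises ValueError; outside Pre_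
  | c0 :: rest =>
    let key := fun c : Int × Int => (((cand.getD c []).length : Int), -c.2, c.1)
    let cbest := rest.foldl (fun best c => if pvLt3 (key c) (key best) then c else best) c0
    -- candidates[j, k][0]: the list at a present key is nonempty, [0] is its head
    ((cand.getD cbest []).headD 0, cbest.1, cbest.2)

def find_most_unique_match (original_lines : List String) (section_lines : List String) : Int × Int × Int :=
  pvSelectA (pvGroupA (pvSortBlocks
    (pvAllMatches original_lines section_lines (pvChainB section_lines)
      original_lines.length 0 (original_lines.length : Int))))

-- ===== PORT B =====
-- Source B's explicit worklist (stack top = list head; Python pushes (i+k, ahi) then (alo, i), so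
-- (alo, i) is popped first).  Fuel 2*len(original)+1 dominates the loop's trip count.
def pvWorklist (a b : List String) (b2j : PySem.Dict String (List Int)) :
    Nat → List (Int × Int) → List (Int × Int × Int) → List (Int × Int × Int)
  | 0, _, acc => acc
  | _ + 1, [], acc => acc
  | n + 1, (lo, hi) :: rest, acc =>
    if lo < hi then
      let x := pvFlm a b b2j lo hi 0 (b.length : Int)
      if x.2.2 = 0 then pvWorklist a b b2j n rest acc
      else pvWorklist a b b2j n ((lo, x.1) :: (x.1 + x.2.2, hi) :: rest) (acc ++ [x])
    else pvWorklist a b b2j n rest acc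

-- counts[j, k] = counts.get((j, k), 0) + 1, then min over the generated 4-tuples
def pvSelectB (blocks : List (Int × Int × Int)) : Int × Int × Int :=
  let counts := blocks.foldl
    (fun d x => d.insert (x.2.1, x.2.2) (d.getD (x.2.1, x.2.2) 0 + 1)) PySem.Dict.empty
  match blocks.map (fun x => (counts.getD (x.2.1, x.2.2) 0, -x.2.2, x.2.1, x.1)) with
  | [] => (0, 0, 0)  -- Python: min() of an empty generator raises ValueError; outside Pre_
  | t0 :: ts =>
    let best := ts.foldl (fun best t => if pvLt4 t best then t else best) t0
    (best.2.2.2, best.2.2.1, -best.2.1)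

def find_most_unique_match_alt (original_lines : List String) (section_lines : List String) : Int × Int × Int :=
  pvSelectB (pvWorklist original_lines section_lines (pvChainB section_lines)
    (2 * original_lines.length + 1) [(0, (original_lines.length : Int))] [])

-- ===== PRECONDITION & SPEC =====
-- Pre_ excludes exactly the inputs with no matching block at all — no common line kept in
-- difflib's index (for len(section_lines) >= 200 autojunk drops lines occurring more than
-- len//100 + 1 times) and differing first lines (difflib's equality-extension of the empty
-- match (0,0,0) finds nothing) — where A raises ValueError from min() of an empty dict
-- (B raises ValueError there too).
def Pre_find_most_unique_match (original_lines : List String) (section_lines : List String) : Prop :=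
  (∃ x ∈ original_lines, x ∈ section_lines ∧
    (section_lines.length < 200 ∨ section_lines.count x ≤ section_lines.length / 100 + 1)) ∨
  (∃ h, original_lines.head? = some h ∧ section_lines.head? = some h)
instance (original_lines : List String) (section_lines : List String) : Decidable (Pre_find_most_unique_match original_lines section_lines) := by unfold Pre_find_most_unique_match; infer_instance

def pvWitness_find_most_unique_match : List String × List String := (["a", "b"], ["b", "c"])

def Spec_find_most_unique_match (original_lines : List String) (section_lines : List String) (out : Int × Int × Int) : Prop := out = find_most_unique_match_alt original_lines section_lines
instance (original_lines : List String) (section_lines : List String) (out : Int × Int × Int) : Decidable (Spec_find_most_unique_match original_lines section_lines out) := by unfold Spec_find_most_unique_match; infer_instance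

-- ===== CLAIM (what is proved, stated in full; the proofs are below) =====
def Claim_equal_find_most_unique_match : Prop := ∀ (original_lines : List String) (section_lines : List String), Dom_find_most_unique_match original_lines section_lines → Pre_find_most_unique_match original_lines section_lines → Spec_find_most_unique_match original_lines section_lines (find_most_unique_match original_lines section_lines)

-- ===== LEMMAS AND PROOFS =====
-- bounds of find_longest_match's result, used throughout
theorem pvFlmInner_bounds (blo bhi i alo : Int) :
    ∀ (js : List Int) (old new : PySem.Dict Int Int) (best : Int × Int × Int),
      (∀ j, 0 ≤ old.getD j 0 ∧ old.getD j 0 ≤ i - alo) →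
      (∀ j, 0 ≤ new.getD j 0 ∧ new.getD j 0 ≤ i - alo + 1) →
      (alo ≤ best.1 ∧ 0 ≤ best.2.2 ∧ best.1 + best.2.2 ≤ i + 1) →
      (∀ j, 0 ≤ (pvFlmInner blo bhi i js old new best).1.getD j 0 ∧
            (pvFlmInner blo bhi i js old new best).1.getD j 0 ≤ i - alo + 1) ∧
      (alo ≤ (pvFlmInner blo bhi i js old new best).2.1 ∧
       0 ≤ (pvFlmInner blo bhi i js old new best).2.2.2 ∧
       (pvFlmInner blo bhi i js old new best).2.1 + (pvFlmInner blo bhi i js old new best).2.2.2 ≤ i + 1) := by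
  intro js
  induction js with
  | nil => intro old new best hold hnew hbest; exact ⟨hnew, hbest⟩
  | cons j js ih =>
    intro old new best hold hnew hbest
    obtain ⟨b1, b2, b3⟩ := best
    by_cases h1 : j < blo
    · rw [pvFlmInner, if_pos h1]; exact ih old new (b1, b2, b3) hold hnew hbest
    · by_cases h2 : bhi ≤ j
      · rw [pvFlmInner, if_neg h1, if_pos h2]; exact ⟨hnew, hbest⟩
      · rw [pvFlmInner, if_neg h1, if_neg h2]
        have hk := hold (j - 1)
        simp only at hbest
        refine ih old _ _ hold ?_ ?_
        · intro j'
          rw [PySem.Dict.getD_insert]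
          split
          · simp; omega
          · exact hnew j'
        · split
          · refine ⟨by simp; omega, by simp; omega, by simp; omega⟩
          · exact ⟨by simp; omega, by simp; omega, by simp; omega⟩

theorem pvExtendLo_bounds (a b : List String) (alo blo : Int) :
    ∀ (n : Nat) (best : Int × Int × Int), alo ≤ best.1 → 0 ≤ best.2.2 →
      alo ≤ (pvExtendLo a b alo blo n best).1 ∧
      0 ≤ (pvExtendLo a b alo blo n best).2.2 ∧
      (pvExtendLo a b alo blo n best).1 + (pvExtendLo a b alo blo n best).2.2 = best.1 + best.2.2 := by
  intro n
  induction n with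
  | zero => intro best h1 h2; rw [pvExtendLo]; exact ⟨h1, h2, rfl⟩
  | succ n ih =>
    intro best h1 h2
    obtain ⟨b1, b2, b3⟩ := best
    simp only at h1 h2
    rw [pvExtendLo]
    split
    · rename_i hc
      simp only at hc
      have h3 := ih (b1 - 1, b2 - 1, b3 + 1) (by simp only; omega) (by simp only; omega)
      simp only at h3 ⊢
      omega
    · exact ⟨h1, h2, rfl⟩

theorem pvExtendHi_bounds (a b : List String) (ahi bhi : Int) :
    ∀ (n : Nat) (best : Int × Int × Int), 0 ≤ best.2.2 →
      (pvExtendHi a b ahi bhi n best).1 = best.1 ∧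
      0 ≤ (pvExtendHi a b ahi bhi n best).2.2 ∧
      (pvExtendHi a b ahi bhi n best).1 + (pvExtendHi a b ahi bhi n best).2.2 ≤ max (best.1 + best.2.2) ahi := by
  intro n
  induction n with
  | zero => intro best h2; rw [pvExtendHi]; exact ⟨rfl, h2, by omega⟩
  | succ n ih =>
    intro best h2
    obtain ⟨b1, b2, b3⟩ := best
    simp only at h2
    rw [pvExtendHi]
    split
    · rename_i hc
      simp only at hc
      have h3 := ih (b1, b2, b3 + 1) (by simp only; omega)
      simp only at h3 ⊢
      omega
    · refine ⟨rfl, h2, ?_⟩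
      simp only
      omega

theorem pvFlmRows (a b : List String) (b2j : PySem.Dict String (List Int)) (alo blo bhi ahi : Int) :
    ∀ (m : Nat) (lo : Int) (st : PySem.Dict Int Int × (Int × Int × Int)), (ahi - lo).toNat = m →
      alo ≤ lo → lo ≤ ahi →
      (∀ j, 0 ≤ st.1.getD j 0 ∧ st.1.getD j 0 ≤ lo - alo) →
      (alo ≤ st.2.1 ∧ 0 ≤ st.2.2.2 ∧ st.2.1 + st.2.2.2 ≤ lo) →
      (alo ≤ ((PySem.List.pyRange lo ahi 1).foldl
        (fun (st : PySem.Dict Int Int × (Int × Int × Int)) i =>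
          pvFlmInner blo bhi i (b2j.getD (PySem.List.pyGetD a i "") []) st.1 PySem.Dict.empty st.2)
        st).2.1 ∧
       0 ≤ ((PySem.List.pyRange lo ahi 1).foldl
        (fun (st : PySem.Dict Int Int × (Int × Int × Int)) i =>
          pvFlmInner blo bhi i (b2j.getD (PySem.List.pyGetD a i "") []) st.1 PySem.Dict.empty st.2)
        st).2.2.2 ∧
       ((PySem.List.pyRange lo ahi 1).foldl
        (fun (st : PySem.Dict Int Int × (Int × Int × Int)) i =>
          pvFlmInner blo bhi i (b2j.getD (PySem.List.pyGetD a i "") []) st.1 PySem.Dict.empty st.2)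
        st).2.1 +
       ((PySem.List.pyRange lo ahi 1).foldl
        (fun (st : PySem.Dict Int Int × (Int × Int × Int)) i =>
          pvFlmInner blo bhi i (b2j.getD (PySem.List.pyGetD a i "") []) st.1 PySem.Dict.empty st.2)
        st).2.2.2 ≤ ahi) := by
  intro m
  induction m with
  | zero =>
    intro lo st hm h1 h2 hd hb
    have hlo : lo = ahi := by omega
    subst hlo
    rw [PySem.List.pyRange_one_eq_nil le_rfl]
    simpa using ⟨hb.1, hb.2.1, by omega⟩
  | succ m ih =>
    intro lo st hm h1 h2 hd hb
    have hlt : lo < ahi := by omega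
    rw [PySem.List.pyRange_one_cons hlt, List.foldl_cons]
    have hin := pvFlmInner_bounds blo bhi lo alo (b2j.getD (PySem.List.pyGetD a lo "") [])
      st.1 PySem.Dict.empty st.2 hd
      (by intro j; rw [PySem.Dict.getD_empty]; omega)
      ⟨hb.1, hb.2.1, by omega⟩
    exact ih (lo + 1) _ (by omega) (by omega) (by omega)
      (by intro j; have := hin.1 j; omega)
      (by have := hin.2; omega)

theorem pvFlm_bounds (a b : List String) (b2j : PySem.Dict String (List Int)) (alo ahi blo bhi : Int)
    (h : alo ≤ ahi) :
    alo ≤ (pvFlm a b b2j alo ahi blo bhi).1 ∧ 0 ≤ (pvFlm a b b2j alo ahi blo bhi).2.2 ∧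
    (pvFlm a b b2j alo ahi blo bhi).1 + (pvFlm a b b2j alo ahi blo bhi).2.2 ≤ ahi := by
  have hrows := pvFlmRows a b b2j alo blo bhi ahi (ahi - alo).toNat alo
    (PySem.Dict.empty, (alo, blo, 0)) rfl le_rfl h
    (by intro j; rw [PySem.Dict.getD_empty]; omega)
    (by refine ⟨le_rfl, le_rfl, ?_⟩; simp only; omega)
  rw [pvFlm]
  set r := (PySem.List.pyRange alo ahi 1).foldl
    (fun (st : PySem.Dict Int Int × (Int × Int × Int)) i =>
      pvFlmInner blo bhi i (b2j.getD (PySem.List.pyGetD a i "") []) st.1 PySem.Dict.empty st.2)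
    (PySem.Dict.empty, (alo, blo, 0)) with hr
  have hlo := pvExtendLo_bounds a b alo blo (r.2.1 - alo).toNat r.2 hrows.1 hrows.2.1
  set w := pvExtendLo a b alo blo (r.2.1 - alo).toNat r.2 with hw
  have hhi := pvExtendHi_bounds a b ahi bhi (ahi - (w.1 + w.2.2)).toNat w hlo.2.1
  omega


-- pvAllMatches ignores its fuel beyond the interval length
theorem pvAllMatches_nil (a b : List String) (b2j : PySem.Dict String (List Int))
    (n : Nat) (alo ahi : Int) (h : ahi ≤ alo) : pvAllMatches a b b2j n alo ahi = [] := by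
  cases n with
  | zero => rfl
  | succ n => rw [pvAllMatches, if_pos h]

theorem pvAllMatches_fuel (a b : List String) (b2j : PySem.Dict String (List Int)) :
    ∀ (n m : Nat) (alo ahi : Int), (ahi - alo).toNat ≤ n → (ahi - alo).toNat ≤ m →
      pvAllMatches a b b2j n alo ahi = pvAllMatches a b b2j m alo ahi := by
  intro n
  induction n with
  | zero =>
    intro m alo ahi hn hm
    rw [pvAllMatches_nil a b b2j 0 alo ahi (by omega), pvAllMatches_nil a b b2j m alo ahi (by omega)]
  | succ n ih =>
    intro m alo ahi hn hm
    by_cases hle : ahi ≤ alo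
    · rw [pvAllMatches_nil a b b2j _ alo ahi hle, pvAllMatches_nil a b b2j m alo ahi hle]
    · obtain ⟨m', rfl⟩ : ∃ m', m = m' + 1 := ⟨m - 1, by omega⟩
      rw [pvAllMatches, pvAllMatches, if_neg hle, if_neg hle]
      simp only
      by_cases hk : (pvFlm a b b2j alo ahi 0 (b.length : Int)).2.2 = 0
      · rw [if_pos hk, if_pos hk]
      · rw [if_neg hk, if_neg hk]
        have hb := pvFlm_bounds a b b2j alo ahi 0 (b.length : Int) (by omega)
        rw [ih m' alo (pvFlm a b b2j alo ahi 0 (b.length : Int)).1 (by omega) (by omega),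
            ih m' ((pvFlm a b b2j alo ahi 0 (b.length : Int)).1 +
              (pvFlm a b b2j alo ahi 0 (b.length : Int)).2.2) ahi (by omega) (by omega)]

-- pvLt3/pvLt4 are strict total orders
theorem pvLt3_irrefl (u : Int × Int × Int) : pvLt3 u u = false := by
  simp [pvLt3]

theorem pvLt3_trans {u v w : Int × Int × Int} (h1 : pvLt3 u v) (h2 : pvLt3 v w) : pvLt3 u w := by
  simp only [pvLt3, Bool.or_eq_true, Bool.and_eq_true, decide_eq_true_eq, beq_iff_eq] at *
  omega

theorem pvLt3_total {u v : Int × Int × Int} (h1 : pvLt3 u v = false) (h2 : u ≠ v) : pvLt3 v u = true := by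
  obtain ⟨u1, u2, u3⟩ := u
  obtain ⟨v1, v2, v3⟩ := v
  simp only [pvLt3, Prod.mk.injEq, not_and, Bool.or_eq_true, Bool.and_eq_true,
    decide_eq_true_eq, beq_iff_eq, Bool.or_eq_false_iff, Bool.and_eq_false_iff,
    decide_eq_false_iff_not, beq_eq_false_iff_ne, ne_eq, not_lt] at *
  omega

theorem pvLt4_irrefl (u : Int × Int × Int × Int) : pvLt4 u u = false := by
  simp [pvLt4, pvLt3]

theorem pvLt4_trans {u v w : Int × Int × Int × Int} (h1 : pvLt4 u v) (h2 : pvLt4 v w) : pvLt4 u w := by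
  simp only [pvLt4, pvLt3, Bool.or_eq_true, Bool.and_eq_true, decide_eq_true_eq, beq_iff_eq] at *
  omega

theorem pvLt4_antisymm {u v : Int × Int × Int × Int} (h1 : pvLt4 u v = false) (h2 : pvLt4 v u = false) : u = v := by
  obtain ⟨u1, u2, u3, u4⟩ := u
  obtain ⟨v1, v2, v3, v4⟩ := v
  simp only [pvLt4, pvLt3, Prod.mk.injEq, Bool.or_eq_false_iff, Bool.and_eq_false_iff,
    decide_eq_false_iff_not, beq_eq_false_iff_ne, ne_eq, not_lt] at *
  omega

-- generic first-minimum fold (Python's min with a strict '<' comparator)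
theorem pvMinFold {α : Type} (lt : α → α → Bool)
    (hirr : ∀ x, lt x x = false) (htr : ∀ x y z, lt x y → lt y z → lt x z)
    (hntr : ∀ x y z, lt x y = false → lt y z = false → lt x z = false) :
    ∀ (l : List α) (b : α),
      (l.foldl (fun best x => if lt x best then x else best) b = b ∨
       l.foldl (fun best x => if lt x best then x else best) b ∈ l) ∧
      (∀ x, (x = b ∨ x ∈ l) → lt x (l.foldl (fun best x => if lt x best then x else best) b) = false) := by
  intro l
  induction l with
  | nil => intro b; simp [hirr]
  | cons y t ih =>
    intro b
    simp only [List.foldl_cons]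
    by_cases hy : lt y b
    · rw [if_pos hy]
      refine ⟨?_, ?_⟩
      · rcases (ih y).1 with h | h
        · right; simp [h]
        · right; simp [h]
      · intro x hx
        rcases hx with rfl | hx
        · have hyr := (ih y).2 y (Or.inl rfl)
          by_cases hbr : lt x (t.foldl (fun best x => if lt x best then x else best) y)
          · exact absurd (htr y x _ hy hbr) (by simp [hyr])
          · simpa using hbr
        · rcases List.mem_cons.mp hx with heq | hx
          · subst heq; exact (ih x).2 x (Or.inl rfl)
          · exact (ih y).2 x (Or.inr hx)
    · rw [if_neg hy]
      refine ⟨?_, ?_⟩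
      · rcases (ih b).1 with h | h
        · left; exact h
        · right; simp [h]
      · intro x hx
        rcases hx with rfl | hx
        · exact (ih x).2 x (Or.inl rfl)
        · rcases List.mem_cons.mp hx with heq | hx
          · subst heq; exact hntr x b _ (by simpa using hy) ((ih b).2 b (Or.inl rfl))
          · exact (ih b).2 x (Or.inr hx)

-- worklist fuel: potential of the stack
def pvPot (st : List (Int × Int)) : Nat := (st.map (fun p => 2 * (p.2 - p.1).toNat + 1)).sum

theorem pvWorklist_perm (a b : List String) (b2j : PySem.Dict String (List Int)) :
    ∀ (n : Nat) (stack : List (Int × Int)) (acc : List (Int × Int × Int)), pvPot stack ≤ n →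
      (pvWorklist a b b2j n stack acc).Perm
        (acc ++ stack.flatMap (fun p => pvAllMatches a b b2j (p.2 - p.1).toNat p.1 p.2)) := by
  intro n
  induction n with
  | zero =>
    intro stack acc hpot
    have hs : stack = [] := by
      cases stack with
      | nil => rfl
      | cons p t => exfalso; simp [pvPot] at hpot
    subst hs
    simp [pvWorklist]
  | succ n ih =>
    intro stack acc hpot
    cases stack with
    | nil => simp [pvWorklist]
    | cons p rest =>
      obtain ⟨lo, hi⟩ := p
      rw [pvWorklist]
      by_cases hlt : lo < hi
      · rw [if_pos hlt]
        have hb := pvFlm_bounds a b b2j lo hi 0 (b.length : Int) (by omega)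
        obtain ⟨f, hf⟩ : ∃ f, (hi - lo).toNat = f + 1 := ⟨(hi - lo).toNat - 1, by omega⟩
        by_cases hk : (pvFlm a b b2j lo hi 0 (b.length : Int)).2.2 = 0
        · rw [if_pos hk]
          have hall : pvAllMatches a b b2j (hi - lo).toNat lo hi = [] := by
            rw [hf, pvAllMatches, if_neg (by omega)]
            simp only
            rw [if_pos hk]
          have hres := ih rest acc (by simp only [pvPot, List.map_cons, List.sum_cons] at hpot ⊢; omega)
          simpa [hall] using hres
        · rw [if_neg hk]
          have hall : pvAllMatches a b b2j (hi - lo).toNat lo hi =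
              pvAllMatches a b b2j
                ((pvFlm a b b2j lo hi 0 (b.length : Int)).1 - lo).toNat lo
                (pvFlm a b b2j lo hi 0 (b.length : Int)).1 ++
                pvFlm a b b2j lo hi 0 (b.length : Int) ::
                  pvAllMatches a b b2j
                    (hi - ((pvFlm a b b2j lo hi 0 (b.length : Int)).1 +
                      (pvFlm a b b2j lo hi 0 (b.length : Int)).2.2)).toNat
                    ((pvFlm a b b2j lo hi 0 (b.length : Int)).1 +
                      (pvFlm a b b2j lo hi 0 (b.length : Int)).2.2) hi := by
            rw [hf, pvAllMatches, if_neg (by omega)]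
            simp only
            rw [if_neg hk]
            rw [pvAllMatches_fuel a b b2j f _ lo (pvFlm a b b2j lo hi 0 (b.length : Int)).1
                  (by omega) le_rfl,
                pvAllMatches_fuel a b b2j f _
                  ((pvFlm a b b2j lo hi 0 (b.length : Int)).1 +
                    (pvFlm a b b2j lo hi 0 (b.length : Int)).2.2) hi (by omega) le_rfl]
          have hfuel : pvPot ((lo, (pvFlm a b b2j lo hi 0 (b.length : Int)).1) ::
              ((pvFlm a b b2j lo hi 0 (b.length : Int)).1 +
                (pvFlm a b b2j lo hi 0 (b.length : Int)).2.2, hi) :: rest) ≤ n := by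
            simp only [pvPot, List.map_cons, List.sum_cons] at hpot ⊢
            omega
          refine (ih _ _ hfuel).trans ?_
          simp only [List.flatMap_cons]
          rw [hall]
          simp only [List.append_assoc, List.cons_append]
          refine List.Perm.append_left acc ?_
          have := List.perm_append_comm_assoc [pvFlm a b b2j lo hi 0 (b.length : Int)]
            (pvAllMatches a b b2j
              ((pvFlm a b b2j lo hi 0 (b.length : Int)).1 - lo).toNat lo
              (pvFlm a b b2j lo hi 0 (b.length : Int)).1)
            (pvAllMatches a b b2j
              (hi - ((pvFlm a b b2j lo hi 0 (b.length : Int)).1 +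
                (pvFlm a b b2j lo hi 0 (b.length : Int)).2.2)).toNat
              ((pvFlm a b b2j lo hi 0 (b.length : Int)).1 +
                (pvFlm a b b2j lo hi 0 (b.length : Int)).2.2) hi ++
                rest.flatMap (fun p => pvAllMatches a b b2j (p.2 - p.1).toNat p.1 p.2))
          simpa using this
      · rw [if_neg hlt]
        have hall : pvAllMatches a b b2j (hi - lo).toNat lo hi = [] :=
          pvAllMatches_nil a b b2j _ lo hi (by omega)
        have hres := ih rest acc (by simp only [pvPot, List.map_cons, List.sum_cons] at hpot ⊢; omega)
        simpa [hall] using hres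

-- structure of A's recursive block list
theorem pvAllMatches_bounds (a b : List String) (b2j : PySem.Dict String (List Int)) :
    ∀ (n : Nat) (alo ahi : Int),
      (∀ x ∈ pvAllMatches a b b2j n alo ahi, alo ≤ x.1 ∧ 0 < x.2.2 ∧ x.1 + x.2.2 ≤ ahi) ∧
      (pvAllMatches a b b2j n alo ahi).Pairwise (fun x y => x.1 < y.1) := by
  intro n
  induction n with
  | zero => intro alo ahi; simp [pvAllMatches]
  | succ n ih =>
    intro alo ahi
    rw [pvAllMatches]
    by_cases h : ahi ≤ alo
    · simp [h]
    · rw [if_neg h]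
      simp only
      by_cases hk : (pvFlm a b b2j alo ahi 0 (b.length : Int)).2.2 = 0
      · simp [hk]
      · rw [if_neg hk]
        have hb := pvFlm_bounds a b b2j alo ahi 0 (b.length : Int) (by omega)
        obtain ⟨hm1, hp1⟩ := ih alo (pvFlm a b b2j alo ahi 0 (b.length : Int)).1
        obtain ⟨hm2, hp2⟩ := ih ((pvFlm a b b2j alo ahi 0 (b.length : Int)).1 +
          (pvFlm a b b2j alo ahi 0 (b.length : Int)).2.2) ahi
        constructor
        · intro y hy
          rcases List.mem_append.mp hy with hy | hy
          · have := hm1 y hy; omega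
          · rcases List.mem_cons.mp hy with rfl | hy
            · omega
            · have := hm2 y hy; omega
        · rw [List.pairwise_append]
          refine ⟨hp1, ?_, ?_⟩
          · rw [List.pairwise_cons]
            exact ⟨fun y hy => by have := hm2 y hy; omega, hp2⟩
          · intro y hy z hz
            have h1 := hm1 y hy
            rcases List.mem_cons.mp hz with rfl | hz
            · omega
            · have := hm2 z hz; omega

-- an already strictly increasing list is its own insertion sort
theorem pvSortBlocks_eq_self (l : List (Int × Int × Int))
    (h : l.Pairwise (fun x y => x.1 < y.1)) : pvSortBlocks l = l := by
  induction l using List.reverseRecOn with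
  | nil => rfl
  | append_singleton t x ih =>
    rw [List.pairwise_append] at h
    unfold pvSortBlocks at ih ⊢
    rw [List.foldl_append, List.foldl_cons, List.foldl_nil, ih h.1]
    refine PySem.List.insertBy_of_forall_not_before _ _ _ (fun y hy => ?_)
    have := h.2.2 y hy x (List.mem_singleton_self x)
    simp only [pvLt3, Bool.or_eq_false_iff, Bool.and_eq_false_iff]
    refine ⟨by simp; omega, Or.inl (by simp; omega)⟩

theorem pvLt3_neg_trans {u v w : Int × Int × Int} (h1 : pvLt3 u v = false) (h2 : pvLt3 v w = false) : pvLt3 u w = false := by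
  obtain ⟨u1, u2, u3⟩ := u
  obtain ⟨v1, v2, v3⟩ := v
  obtain ⟨w1, w2, w3⟩ := w
  simp only [pvLt3, Bool.or_eq_false_iff, Bool.and_eq_false_iff, decide_eq_false_iff_not,
    beq_eq_false_iff_ne, ne_eq, not_lt] at *
  omega

theorem pvLt4_neg_trans {u v w : Int × Int × Int × Int} (h1 : pvLt4 u v = false) (h2 : pvLt4 v w = false) : pvLt4 u w = false := by
  obtain ⟨u1, u2, u3, u4⟩ := u
  obtain ⟨v1, v2, v3, v4⟩ := v
  obtain ⟨w1, w2, w3, w4⟩ := w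
  simp only [pvLt4, pvLt3, Bool.or_eq_false_iff, Bool.and_eq_false_iff, decide_eq_false_iff_not,
    beq_eq_false_iff_ne, ne_eq, not_lt] at *
  omega

-- the grouping dict, characterised
theorem pvGroupA_getD (L : List (Int × Int × Int)) (c : Int × Int) :
    (pvGroupA L).getD c [] =
      (L.filter (fun x => (x.2.1, x.2.2) == c)).map (fun x => x.1) := by
  have h : pvGroupA L = (L.map (fun x => ((x.2.1, x.2.2), x.1))).foldl
      (fun d p => d.modify p.1 [] (fun l => l ++ [p.2])) PySem.Dict.empty := by
    rw [List.foldl_map]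
    rfl
  rw [h, PySem.Dict.getD_foldl_modify_append, PySem.Dict.getD_empty, List.filter_map, List.map_map]
  simp [Function.comp_def]

theorem pvGroupA_keys (L : List (Int × Int × Int)) :
    (pvGroupA L).keys = PySem.Set.ofList (L.map (fun x => (x.2.1, x.2.2))) := by
  unfold pvGroupA
  rw [PySem.Dict.keys_foldl_modify_key L (fun x => (x.2.1, x.2.2)) []
    (fun _ x => fun l => l ++ [x.1]), PySem.Dict.keys_empty, PySem.Set.update_nil_left]

-- the counter dict, characterised
theorem pvCountsB_getD (M : List (Int × Int × Int)) (c : Int × Int) :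
    (M.foldl (fun d x => d.insert (x.2.1, x.2.2) (d.getD (x.2.1, x.2.2) 0 + 1))
      PySem.Dict.empty).getD c 0 = ((M.map (fun x => (x.2.1, x.2.2))).count c : Int) := by
  have h2 := PySem.Dict.getD_foldl_insert_add_one (M.map (fun x => (x.2.1, x.2.2)))
    PySem.Dict.empty c
  rw [List.foldl_map] at h2
  simp only [PySem.Dict.getD_empty, zero_add] at h2
  exact h2

-- the size of a group is the count of its key
theorem pvGroup_length (L : List (Int × Int × Int)) (c : Int × Int) :
    ((pvGroupA L).getD c []).length = (L.map (fun x => (x.2.1, x.2.2))).count c := by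
  rw [pvGroupA_getD, List.length_map]
  simp [List.count, List.countP_eq_length_filter, List.filter_map, Function.comp_def]

-- the heart: A's sort + group + min-over-keys equals B's counter + min-over-4-tuples
theorem pvSelect_eq (L M : List (Int × Int × Int)) (hperm : M.Perm L)
    (hpw : L.Pairwise (fun x y => x.1 < y.1)) :
    pvSelectA (pvGroupA L) = pvSelectB M := by
  by_cases hL : L = []
  · have hM : M = [] := by rw [hL] at hperm; exact hperm.eq_nil
    subst hL; subst hM; rfl
  · have hMne : M ≠ [] := fun hM => hL (by rw [hM] at hperm; exact hperm.symm.eq_nil)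
    have hcnt : ∀ c : Int × Int, (M.map (fun x => (x.2.1, x.2.2))).count c
        = (L.map (fun x => (x.2.1, x.2.2))).count c :=
      fun c => (hperm.map (fun x => (x.2.1, x.2.2))).count_eq c
    have hmemkeys : ∀ c : Int × Int, c ∈ (pvGroupA L).keys ↔ c ∈ L.map (fun x => (x.2.1, x.2.2)) := by
      intro c; rw [pvGroupA_keys]; exact PySem.Set.mem_ofList _ _
    have hmapeq : M.map (fun x => ((M.foldl (fun d y => d.insert (y.2.1, y.2.2)
          (d.getD (y.2.1, y.2.2) 0 + 1)) PySem.Dict.empty).getD (x.2.1, x.2.2) 0,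
          -x.2.2, x.2.1, x.1))
        = M.map (fun x => (((L.map (fun y => (y.2.1, y.2.2))).count (x.2.1, x.2.2) : Int),
          -x.2.2, x.2.1, x.1)) := by
      refine List.map_congr_left (fun x hx => ?_)
      rw [pvCountsB_getD, hcnt]
    simp only [pvSelectA, pvSelectB]
    split
    · rename_i heqk
      exfalso
      obtain ⟨x0, hx0⟩ := List.exists_mem_of_ne_nil L hL
      have hx : (x0.2.1, x0.2.2) ∈ (pvGroupA L).keys :=
        (hmemkeys _).mpr (List.mem_map_of_mem hx0)
      rw [heqk] at hx
      simp at hx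
    · rename_i c0 rest heqk
      have hminA := pvMinFold
        (fun u v : Int × Int =>
          pvLt3 ((((pvGroupA L).getD u []).length : Int), -u.2, u.1)
                ((((pvGroupA L).getD v []).length : Int), -v.2, v.1))
        (fun _ => pvLt3_irrefl _) (fun _ _ _ h1 h2 => pvLt3_trans h1 h2)
        (fun _ _ _ h1 h2 => pvLt3_neg_trans h1 h2) rest c0
      set cbest := rest.foldl (fun best c =>
        if pvLt3 ((((pvGroupA L).getD c []).length : Int), -c.2, c.1)
                 ((((pvGroupA L).getD best []).length : Int), -best.2, best.1)
        then c else best) c0 with hcbdef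
      have hcbkeys : cbest ∈ (pvGroupA L).keys := by
        rw [heqk]
        rcases hminA.1 with h | h
        · rw [h]; exact List.mem_cons_self
        · exact List.mem_cons_of_mem _ h
      have hcbL : cbest ∈ L.map (fun x => (x.2.1, x.2.2)) := (hmemkeys _).mp hcbkeys
      have hm3 : ∀ c ∈ L.map (fun x => (x.2.1, x.2.2)),
          pvLt3 (((L.map (fun y => (y.2.1, y.2.2))).count c : Int), -c.2, c.1)
                (((L.map (fun y => (y.2.1, y.2.2))).count cbest : Int), -cbest.2, cbest.1) = false := by
        intro c hc
        have hck : c ∈ (pvGroupA L).keys := (hmemkeys _).mpr hc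
        rw [heqk] at hck
        have := hminA.2 c (List.mem_cons.mp hck)
        rw [pvGroup_length, pvGroup_length] at this
        exact this
      obtain ⟨x0, hx0L, hx0K⟩ := List.mem_map.mp hcbL
      have hx0f : x0 ∈ L.filter (fun x => (x.2.1, x.2.2) == cbest) :=
        List.mem_filter.mpr ⟨hx0L, by simp [hx0K]⟩
      rcases hfil : L.filter (fun x => (x.2.1, x.2.2) == cbest) with _ | ⟨f0, ft⟩
      · rw [hfil] at hx0f; simp at hx0f
      have hf0 : f0 ∈ L ∧ ((f0.2.1, f0.2.2) == cbest) = true := by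
        have : f0 ∈ L.filter (fun x => (x.2.1, x.2.2) == cbest) := by
          rw [hfil]; exact List.mem_cons_self
        exact ⟨(List.mem_filter.mp this).1, (List.mem_filter.mp this).2⟩
      have hf0K : (f0.2.1, f0.2.2) = cbest := by
        have := hf0.2; simpa using this
      have hgmin : ∀ x ∈ L, (x.2.1, x.2.2) = cbest → f0.1 ≤ x.1 := by
        intro x hxL hxK
        have hxf : x ∈ L.filter (fun x => (x.2.1, x.2.2) == cbest) :=
          List.mem_filter.mpr ⟨hxL, by simp [hxK]⟩
        rw [hfil] at hxf
        have hGpw := (hpw.filter (fun x => (x.2.1, x.2.2) == cbest))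
        rw [hfil] at hGpw
        rcases List.mem_cons.mp hxf with rfl | hxf
        · exact le_refl _
        · exact le_of_lt ((List.pairwise_cons.mp hGpw).1 x hxf)
      split
      · rename_i heqm
        exfalso
        exact hMne (List.map_eq_nil_iff.mp heqm)
      · rename_i t0 ts heqm
        have hminB := pvMinFold pvLt4 pvLt4_irrefl (fun _ _ _ h1 h2 => pvLt4_trans h1 h2)
          (fun _ _ _ h1 h2 => pvLt4_neg_trans h1 h2) ts t0
        set best := ts.foldl (fun best t => if pvLt4 t best then t else best) t0 with hbdef
        set Tstar : Int × Int × Int × Int :=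
          (((L.map (fun y => (y.2.1, y.2.2))).count cbest : Int), -cbest.2, cbest.1, f0.1)
          with hTdef
        have hmem4 : ∀ t, t ∈ t0 :: ts ↔ ∃ x ∈ M,
            t = (((L.map (fun y => (y.2.1, y.2.2))).count (x.2.1, x.2.2) : Int),
              -x.2.2, x.2.1, x.1) := by
          intro t
          rw [← heqm, hmapeq, List.mem_map]
          constructor
          · rintro ⟨x, hx, rfl⟩; exact ⟨x, hx, rfl⟩
          · rintro ⟨x, hx, rfl⟩; exact ⟨x, hx, rfl⟩
        have hTmem : Tstar ∈ t0 :: ts := by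
          rw [hmem4]
          refine ⟨f0, hperm.mem_iff.mpr hf0.1, ?_⟩
          rw [hTdef]
          rw [← hf0K]
        have hTmin : ∀ t ∈ t0 :: ts, pvLt4 t Tstar = false := by
          intro t ht
          obtain ⟨x, hxM, rfl⟩ := (hmem4 t).mp ht
          have hxL : x ∈ L := hperm.mem_iff.mp hxM
          obtain ⟨xa, xb, xc⟩ := x
          simp only at *
          by_cases hxc : ((xb : Int), (xc : Int)) = cbest
          · have hle := hgmin (xa, xb, xc) hxL (by simpa using hxc)
            simp only at hle
            have h1 : (xb : Int) = cbest.1 := by rw [← hxc]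
            have h2 : (xc : Int) = cbest.2 := by rw [← hxc]
            rw [hTdef, hxc]
            simp only [pvLt4, pvLt3, Bool.or_eq_false_iff, Bool.and_eq_false_iff,
              decide_eq_false_iff_not, beq_eq_false_iff_ne, ne_eq, not_lt]
            exact ⟨by omega, Or.inr ⟨by omega, Or.inr ⟨by omega, Or.inr (by omega)⟩⟩⟩
          · have hxk : ((xb : Int), (xc : Int)) ∈ L.map (fun y => (y.2.1, y.2.2)) :=
              List.mem_map_of_mem hxL
            have hne3 : (((L.map (fun y => (y.2.1, y.2.2))).count ((xb : Int), (xc : Int)) : Int),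
                (-xc : Int), (xb : Int)) ≠
                (((L.map (fun y => (y.2.1, y.2.2))).count cbest : Int), -cbest.2, cbest.1) := by
              intro he
              apply hxc
              have h1 : (-xc : Int) = -cbest.2 := congrArg (fun t => t.2.1) he
              have h2 : (xb : Int) = cbest.1 := congrArg (fun t => t.2.2) he
              exact Prod.ext (by simpa using h2) (by simp only; omega)
            have hgt := pvLt3_total (hm3 _ hxk) hne3
            rw [hTdef]
            simp only [pvLt4, pvLt3, Bool.or_eq_true, Bool.and_eq_true, decide_eq_true_eq,
              beq_iff_eq, Bool.or_eq_false_iff, Bool.and_eq_false_iff,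
              decide_eq_false_iff_not, beq_eq_false_iff_ne, ne_eq, not_lt] at hgt ⊢
            omega
        have hbestmem : best ∈ t0 :: ts := by
          rcases hminB.1 with h | h
          · rw [h]; exact List.mem_cons_self
          · exact List.mem_cons_of_mem _ h
        have hbestT : best = Tstar :=
          pvLt4_antisymm (hTmin best hbestmem) (hminB.2 Tstar (List.mem_cons.mp hTmem))
        rw [hbestT, hTdef]
        rw [pvGroupA_getD, hfil]
        simp only [List.map_cons, List.headD_cons]
        refine Prod.ext (by simp) (Prod.ext (by simp) (by simp))

-- ===== VERDICT (by name: the statement is the Claim_ definition above) =====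
theorem find_most_unique_match_spec : Claim_equal_find_most_unique_match := by
  intro original_lines section_lines _ _
  unfold Spec_find_most_unique_match
  unfold find_most_unique_match find_most_unique_match_alt
  have hperm := pvWorklist_perm original_lines section_lines (pvChainB section_lines)
    (2 * original_lines.length + 1) [(0, (original_lines.length : Int))] [] (by
      simp [pvPot])
  have hb := pvAllMatches_bounds original_lines section_lines (pvChainB section_lines)
    original_lines.length 0 (original_lines.length : Int)
  rw [pvSortBlocks_eq_self _ hb.2]
  refine pvSelect_eq _ _ ?_ hb.2
  have hfe : (((original_lines.length : Int)) - 0).toNat = original_lines.length := by omega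
  simpa [hfe] using hperm
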